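-- pv_equiv track=rewrite | github.com/LordJatonyas/ROSALIND | Stronghold/GRPH/adjacency_o3.py | adjacency_list
-- ===== SOURCE A (Python) =====
-- def adjacency_list(nodes):
--     res = ""
--     for x in nodes:
--         for y in nodes:
--             if x[0] != y[0]:
--                 if x[1][-3:] == y[1][:3]:
--                     res += f'{x[0]} {y[0]}\n'
--     return res
-- ===== SOURCE B (Python) =====
-- def adjacency_list(nodes):
--     # Index nodes by their length-3 prefix once, then look each suffix up:
--     # O(n + edges) instead of A's O(n^2) double scan.
--     buckets = {}
--     for node in nodes:
--         buckets.setdefault(node[1][:3], []).append(node)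
--     out = []
--     for x in nodes:
--         for y in buckets.get(x[1][-3:], []):
--             if x[0] != y[0]:
--                 out.append(f'{x[0]} {y[0]}\n')
--     return "".join(out)
-- ===== Notes on version B (the rewrite author's own statement) =====
-- stated objective: faster
-- what changed: B builds a dict indexing nodes by their 3-char prefix in one pass and looks each node's 3-char suffix up in it, instead of A's nested scan over all pairs; output is joined from a list instead of repeated string concatenation.
import Mathlib
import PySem

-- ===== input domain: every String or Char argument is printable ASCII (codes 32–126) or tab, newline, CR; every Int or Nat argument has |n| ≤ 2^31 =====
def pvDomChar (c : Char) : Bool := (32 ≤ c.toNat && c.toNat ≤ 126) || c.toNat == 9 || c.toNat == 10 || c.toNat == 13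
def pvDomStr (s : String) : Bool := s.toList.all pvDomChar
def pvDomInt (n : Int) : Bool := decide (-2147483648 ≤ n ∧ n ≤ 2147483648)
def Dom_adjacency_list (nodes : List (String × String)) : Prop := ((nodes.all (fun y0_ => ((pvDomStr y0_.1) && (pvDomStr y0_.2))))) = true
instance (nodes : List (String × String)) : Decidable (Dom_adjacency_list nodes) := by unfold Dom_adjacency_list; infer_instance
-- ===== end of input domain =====

-- B replaces A's O(n^2) all-pairs scan by a dict keyed on each node's 3-char prefix
-- (one build pass, one lookup per node) and joins the lines from a list. Return values agree on all inputs.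

-- shared transliteration helpers: s[:3], s[-3:], f'{a} {b}\n'
def pvPref3 (s : String) : String := PySem.Str.slice s none (some 3)
def pvSuf3 (s : String) : String := PySem.Str.slice s (some (-3)) none
def pvLine (a b : String) : String := a ++ " " ++ b ++ "\n"

-- ===== PORT A =====
def adjacency_list (nodes : List (String × String)) : String :=
  nodes.foldl (fun res x =>
    nodes.foldl (fun res y =>
      if x.1 ≠ y.1 then
        if pvSuf3 x.2 = pvPref3 y.2 then res ++ pvLine x.1 y.1 else res
      else res) res) ""

-- ===== PORT B =====
def adjacency_list_alt (nodes : List (String × String)) : String :=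
  let buckets := nodes.foldl (fun d y => d.modify (pvPref3 y.2) [] (fun l => l ++ [y])) PySem.Dict.empty
  let out := nodes.foldl (fun out x =>
      (buckets.getD (pvSuf3 x.2) []).foldl
        (fun out y => if x.1 ≠ y.1 then out ++ [pvLine x.1 y.1] else out) out)
    ([] : List String)
  PySem.Str.join "" out

-- ===== PRECONDITION & SPEC =====
def Spec_adjacency_list (nodes : List (String × String)) (out : String) : Prop := out = adjacency_list_alt nodes
instance (nodes : List (String × String)) (out : String) : Decidable (Spec_adjacency_list nodes out) := by unfold Spec_adjacency_list; infer_instance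

-- ===== CLAIM (what is proved, stated in full; the proofs are below) =====
def Claim_equal_adjacency_list : Prop := ∀ (nodes : List (String × String)), Dom_adjacency_list nodes → Spec_adjacency_list nodes (adjacency_list nodes)

-- ===== LEMMAS AND PROOFS =====

-- the lines x contributes, in nodes order
def pvLines (nodes : List (String × String)) (x : String × String) : List String :=
  (nodes.filter (fun y => x.1 != y.1 && (pvSuf3 x.2 == pvPref3 y.2))).map (fun y => pvLine x.1 y.1)

theorem pv_intersperse_nil_flatten (l : List (List Char)) :
    (List.intersperse ([] : List Char) l).flatten = l.flatten := by
  induction l with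
  | nil => simp
  | cons a t ih => cases t <;> simp_all [List.intersperse]

theorem pv_cjoin (l : List (List Char)) : PySem.Chars.join [] l = l.flatten := by
  simp [PySem.Chars.join, List.intercalate, pv_intersperse_nil_flatten]

theorem pv_sjoin_nil : PySem.Str.join "" ([] : List String) = "" := by decide

theorem pv_sjoin_cons (a : String) (l : List String) :
    PySem.Str.join "" (a :: l) = a ++ PySem.Str.join "" l := by
  apply String.toList_inj.mp
  simp [PySem.Str.join, pv_cjoin]

theorem pv_sjoin_append (l1 l2 : List String) :
    PySem.Str.join "" (l1 ++ l2) = PySem.Str.join "" l1 ++ PySem.Str.join "" l2 := by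
  apply String.toList_inj.mp
  simp [PySem.Str.join, pv_cjoin]

-- A's inner loop over ys starting from res
theorem pv_innerA (x : String × String) (ys : List (String × String)) :
    ∀ res : String,
      ys.foldl (fun res y =>
        if x.1 ≠ y.1 then
          if pvSuf3 x.2 = pvPref3 y.2 then res ++ pvLine x.1 y.1 else res
        else res) res
      = res ++ PySem.Str.join "" (pvLines ys x) := by
  induction ys with
  | nil => intro res; simp [pvLines, pv_sjoin_nil]
  | cons y t ih =>
    intro res
    unfold pvLines
    by_cases h1 : x.1 = y.1
    · rw [List.foldl_cons, if_neg (by simp [h1]), ih,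
        List.filter_cons_of_neg (by simp [h1])]
      unfold pvLines
      rfl
    · by_cases h2 : pvSuf3 x.2 = pvPref3 y.2
      · rw [List.foldl_cons, if_pos h1, if_pos h2, ih,
          List.filter_cons_of_pos (by simp [h1, h2]),
          List.map_cons, pv_sjoin_cons, String.append_assoc]
        unfold pvLines
        rfl
      · rw [List.foldl_cons, if_pos h1, if_neg h2, ih,
          List.filter_cons_of_neg (by simp [h1, h2])]
        unfold pvLines
        rfl

-- A's outer loop
theorem pv_outerA (nodes : List (String × String)) (xs : List (String × String)) :
    ∀ res : String,
      xs.foldl (fun res x =>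
        nodes.foldl (fun res y =>
          if x.1 ≠ y.1 then
            if pvSuf3 x.2 = pvPref3 y.2 then res ++ pvLine x.1 y.1 else res
          else res) res) res
      = res ++ PySem.Str.join "" (xs.flatMap (pvLines nodes)) := by
  induction xs with
  | nil => intro res; simp [pv_sjoin_nil]
  | cons x t ih =>
    intro res
    rw [List.foldl_cons, pv_innerA, ih, List.flatMap_cons, pv_sjoin_append,
      String.append_assoc]

-- B's dict bucket is exactly the prefix-filtered node list
theorem pv_bucket (nodes : List (String × String)) (k : String) :
    (nodes.foldl (fun d y => d.modify (pvPref3 y.2) [] (fun l => l ++ [y])) PySem.Dict.empty).getD k []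
      = nodes.filter (fun y => pvPref3 y.2 == k) := by
  have hmap : (nodes.map (fun y : String × String => (pvPref3 y.2, y))).foldl
      (fun d (p : String × (String × String)) => d.modify p.1 [] (fun l => l ++ [p.2]))
      PySem.Dict.empty
      = nodes.foldl (fun d y => d.modify (pvPref3 y.2) [] (fun l => l ++ [y])) PySem.Dict.empty := by
    rw [List.foldl_map]
  rw [← hmap, PySem.Dict.getD_foldl_modify_append]
  simp [List.filter_map, Function.comp_def]

-- B's inner loop over one bucket produces x's lines
theorem pv_innerB (nodes : List (String × String)) (x : String × String) (out : List String) :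
    (nodes.filter (fun y => pvPref3 y.2 == pvSuf3 x.2)).foldl
        (fun out y => if x.1 ≠ y.1 then out ++ [pvLine x.1 y.1] else out) out
      = out ++ pvLines nodes x := by
  rw [PySem.List.foldl_append_ite]
  unfold pvLines
  rw [List.filter_filter]
  congr 2
  apply List.filter_congr
  intro y _
  rw [Bool.eq_iff_iff]
  simp only [Bool.and_eq_true, beq_iff_eq, bne_iff_ne, decide_eq_true_eq]
  aesop

-- ===== VERDICT (by name: the statement is the Claim_ definition above) =====
theorem adjacency_list_spec : Claim_equal_adjacency_list := by
  intro nodes _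
  unfold Spec_adjacency_list adjacency_list adjacency_list_alt
  simp only []
  rw [pv_outerA nodes nodes ""]
  have hout : nodes.foldl (fun out x =>
      ((nodes.foldl (fun d y => d.modify (pvPref3 y.2) [] (fun l => l ++ [y])) PySem.Dict.empty).getD
          (pvSuf3 x.2) []).foldl
        (fun out y => if x.1 ≠ y.1 then out ++ [pvLine x.1 y.1] else out) out)
      ([] : List String)
      = nodes.foldl (fun out x => out ++ pvLines nodes x) [] :=
    PySem.List.foldl_congr_mem nodes _ _ _ (by intro acc x _; rw [pv_bucket, pv_innerB])
  rw [hout, PySem.List.foldl_append_eq_flatMap]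
  simp
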